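-- pv_equiv track=rewrite | github.com/Gausslab-SeoulOffice/problems | yunjae/ox_cumsum1.py | ox_cumsum
-- ===== SOURCE A (Python) =====
-- def ox_cumsum(line):
--   stack = []
--   ans = 0
--
--   for i in range(len(line)):
--     if line[i] == 'O':
--       stack.append(line[i])
--       ans += len(stack)
--
--     elif stack and line[i] == 'X':
--       stack = []
--
--     else:
--       continue
--
--   return ans
-- ===== SOURCE B (Python) =====
-- def ox_cumsum(line):
--   ans = 0
--   c = 0
--   for ch in line:
--     if ch == 'O':
--       c += 1
--     elif ch == 'X' and c > 0:
--       ans += c * (c + 1) // 2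
--       c = 0
--   return ans + c * (c + 1) // 2
-- ===== Notes on version B (the rewrite author's own statement) =====
-- stated objective: simpler
-- what changed: Replaces the growing stack list and per-character ans += len(stack) with an integer run-length counter whose triangular-number contribution c*(c+1)//2 is added once per run of O's.
import Mathlib
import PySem

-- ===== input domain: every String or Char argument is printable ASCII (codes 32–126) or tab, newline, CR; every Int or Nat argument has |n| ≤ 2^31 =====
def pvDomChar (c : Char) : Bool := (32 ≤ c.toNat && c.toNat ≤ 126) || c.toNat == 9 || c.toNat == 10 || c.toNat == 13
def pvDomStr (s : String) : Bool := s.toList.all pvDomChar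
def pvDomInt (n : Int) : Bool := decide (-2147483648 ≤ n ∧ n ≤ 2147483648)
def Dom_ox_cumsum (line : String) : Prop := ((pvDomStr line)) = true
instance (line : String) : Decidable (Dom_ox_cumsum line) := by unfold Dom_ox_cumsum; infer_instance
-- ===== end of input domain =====

-- ===== PORT A =====
-- literal port of A: a stack list of 'O's, ans += len(stack) on each 'O', stack reset on 'X'
def ox_cumsum (line : String) : Int :=
  (line.toList.foldl (fun (st : List Char × Int) ch =>
      if ch = 'O' then (st.1 ++ ['O'], st.2 + ((st.1.length : Int) + 1))
      else if st.1 ≠ [] ∧ ch = 'X' then ([], st.2)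
      else st)
    ([], 0)).2

-- ===== PORT B =====
-- B keeps only an integer run length c; each finished run of O's contributes c*(c+1)//2 once
def ox_cumsum_alt (line : String) : Int :=
  (fun (st : Int × Int) => st.2 + PySem.Int.floordiv (st.1 * (st.1 + 1)) 2)
  (line.toList.foldl (fun (st : Int × Int) ch =>
      if ch = 'O' then (st.1 + 1, st.2)
      else if ch = 'X' ∧ st.1 > 0 then (0, st.2 + PySem.Int.floordiv (st.1 * (st.1 + 1)) 2)
      else st)
    (0, 0))

-- ===== PRECONDITION & SPEC =====
def Spec_ox_cumsum (line : String) (out : Int) : Prop := out = ox_cumsum_alt line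
instance (line : String) (out : Int) : Decidable (Spec_ox_cumsum line out) := by unfold Spec_ox_cumsum; infer_instance

-- ===== CLAIM =====
def Claim_equal_ox_cumsum : Prop := ∀ (line : String), Dom_ox_cumsum line → Spec_ox_cumsum line (ox_cumsum line)

-- ===== LEMMAS AND PROOFS =====

def pvTri (c : Int) : Int := PySem.Int.floordiv (c * (c + 1)) 2

lemma pvTri_eq (n : Int) (k : Int) (h : n * (n + 1) = 2 * k) : pvTri n = k := by
  unfold pvTri
  rw [PySem.Int.floordiv_eq_ediv_of_pos (by norm_num), h, Int.mul_ediv_cancel_left _ (by norm_num)]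

lemma pvTri_succ (n : Int) : pvTri (n + 1) = pvTri n + (n + 1) := by
  obtain ⟨k, hk⟩ : Even (n * (n + 1)) := Int.even_mul_succ_self n
  have h1 : pvTri n = k := pvTri_eq n k (by linarith)
  have h2 : pvTri (n + 1) = k + (n + 1) := pvTri_eq (n + 1) (k + (n + 1)) (by linear_combination hk)
  rw [h1, h2]

lemma pvTri_zero : pvTri 0 = 0 := by decide

lemma pv_inv (cs : List Char) : ∀ (stack : List Char) (ansB : Int),
    (cs.foldl (fun (st : List Char × Int) ch =>
        if ch = 'O' then (st.1 ++ ['O'], st.2 + ((st.1.length : Int) + 1))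
        else if st.1 ≠ [] ∧ ch = 'X' then ([], st.2)
        else st) (stack, ansB + pvTri stack.length)).2
    = (fun (st : Int × Int) => st.2 + pvTri st.1)
      (cs.foldl (fun (st : Int × Int) ch =>
        if ch = 'O' then (st.1 + 1, st.2)
        else if ch = 'X' ∧ st.1 > 0 then (0, st.2 + pvTri st.1)
        else st) ((stack.length : Int), ansB)) := by
  induction cs with
  | nil => intro stack ansB; simp
  | cons ch cs ih =>
    intro stack ansB
    by_cases hO : ch = 'O'
    · have h1 : ansB + pvTri (stack.length : Int) + ((stack.length : Int) + 1)
          = ansB + pvTri ((stack ++ ['O']).length : Int) := by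
        simp [pvTri_succ]; push_cast; ring
      simp only [List.foldl_cons, hO, reduceIte]
      rw [h1]
      have := ih (stack ++ ['O']) ansB
      simpa [Int.add_comm] using this
    · by_cases hX : stack ≠ [] ∧ ch = 'X'
      · have hlen : (0:Int) < (stack.length : Int) := by
          have : stack.length ≠ 0 := by simpa using (List.length_pos_iff.mpr hX.1).ne'
          omega
        simp only [List.foldl_cons, if_neg hO, if_pos hX, if_pos (And.intro hX.2 hlen)]
        have := ih [] (ansB + pvTri (stack.length : Int))
        simpa [pvTri_zero] using this
      · have hB : ¬ (ch = 'X' ∧ (stack.length : Int) > 0) := by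
          intro hc
          apply hX
          refine ⟨?_, hc.1⟩
          intro he
          rw [he] at hc
          simp at hc
        simp only [List.foldl_cons, if_neg hO, if_neg hX, if_neg hB]
        exact ih stack ansB

-- ===== VERDICT =====
theorem ox_cumsum_spec : Claim_equal_ox_cumsum := by
  intro line _
  unfold Spec_ox_cumsum ox_cumsum ox_cumsum_alt
  have := pv_inv line.toList [] 0
  simpa [pvTri, pvTri_zero] using this
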